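-- pv_equiv track=rewrite | github.com/Ma0xian412/BackTestSys | quant_framework/config.py | _is_float_string
-- ===== SOURCE A (Python) =====
-- def _is_float_string(s: str) -> bool:
--     """检查字符串是否是有效的浮点数格式。
--
--     有效格式:
--     - 可选正负号
--     - 数字（至少一个）
--     - 可选的小数点和小数部分
--     - 可选的科学计数法 (e/E 后跟可选正负号和数字)
--
--     例如: "3.14", "-1.5", "1e10", "1.5e-3"
--
--     Args:
--         s: 要检查的字符串
--
--     Returns:
--         如果是有效的浮点数格式返回True
--     """
--     if not s:
--         return False
--
--     # 使用状态机方式验证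
--     i = 0
--     n = len(s)
--
--     # 可选的正负号
--     if i < n and s[i] in '+-':
--         i += 1
--
--     # 必须有数字（小数点前或小数点后）
--     has_digits = False
--
--     # 整数部分的数字
--     while i < n and s[i].isdigit():
--         has_digits = True
--         i += 1
--
--     # 可选的小数点和小数部分
--     if i < n and s[i] == '.':
--         i += 1
--         while i < n and s[i].isdigit():
--             has_digits = True
--             i += 1
--
--     # 如果没有任何数字，不是有效浮点数
--     if not has_digits:
--         return False
--
--     # 可选的科学计数法部分
--     if i < n and s[i] in 'eE':
--         i += 1
--         # e/E 后可以有可选的正负号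
--         if i < n and s[i] in '+-':
--             i += 1
--         # e/E 后必须有数字
--         if i >= n or not s[i].isdigit():
--             return False
--         while i < n and s[i].isdigit():
--             i += 1
--
--     # 必须消耗完所有字符
--     return i == n
-- ===== SOURCE B (Python) =====
-- def _is_float_string(s: str) -> bool:
--     # Split on the first 'e'/'E' into mantissa and (optional) exponent part.
--     mant, exp = s, None
--     for i, c in enumerate(s):
--         if c in 'eE':
--             mant, exp = s[:i], s[i + 1:]
--             break
--     # Mantissa: optional leading sign, at most one '.', all other chars digits,
--     # at least one digit overall.
--     if mant[:1] in ('+', '-'):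
--         mant = mant[1:]
--     dot = mant.find('.')
--     if dot == -1:
--         int_part, frac_part = mant, ''
--     else:
--         int_part, frac_part = mant[:dot], mant[dot + 1:]
--     digits = int_part + frac_part
--     if not digits or not all(c.isdigit() for c in digits):
--         return False
--     if exp is None:
--         return True
--     # Exponent: optional sign then one or more digits.
--     if exp[:1] in ('+', '-'):
--         exp = exp[1:]
--     return bool(exp) and all(c.isdigit() for c in exp)
-- ===== Notes on version B (the rewrite author's own statement) =====
-- stated objective: alternative
-- what changed: Replaces A's sequential index-based state machine with a split-based validator: the string is split at the first 'e'/'E' into mantissa and exponent, the mantissa split at the first '.', and each piece checked declaratively (optional sign, all digits, at least one digit).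
import Mathlib
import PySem

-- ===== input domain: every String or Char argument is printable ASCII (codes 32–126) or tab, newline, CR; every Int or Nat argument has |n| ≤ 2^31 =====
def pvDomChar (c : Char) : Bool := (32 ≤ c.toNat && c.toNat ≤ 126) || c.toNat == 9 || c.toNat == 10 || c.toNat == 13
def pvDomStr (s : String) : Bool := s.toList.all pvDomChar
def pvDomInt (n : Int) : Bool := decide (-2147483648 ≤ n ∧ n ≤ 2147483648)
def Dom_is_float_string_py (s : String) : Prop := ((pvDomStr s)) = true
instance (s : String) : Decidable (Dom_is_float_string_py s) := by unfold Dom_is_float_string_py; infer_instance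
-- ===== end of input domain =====

-- B replaces A's index-based state machine with a split-based validator (split at the first
-- 'e'/'E', then at the first '.', each piece checked declaratively); alternative decomposition,
-- same cost; proved equal to A on all inputs (the Dom hypothesis is not even needed).


-- ===== PORT A =====
-- transliteration of A's state machine: optional sign, digit loop, optional '.' + digit loop
-- (has_digits flag), optional 'e/E' + optional sign + required digit loop, then "i == n".
def pvAExp (r : List Char) : Bool :=
  let r' := match r with
    | c :: w => if c = '+' || c = '-' then w else c :: w
    | [] => []
  match r' with
  | [] => false
  | c :: _ =>
    if PySem.Chars.isdigit c then (r'.dropWhile PySem.Chars.isdigit).isEmpty else false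
def pvATail (has : Bool) (r2 : List Char) : Bool :=
  if !has then false
  else match r2 with
    | [] => true
    | c :: r => if c = 'e' || c = 'E' then pvAExp r else false
def pvACore (t : List Char) : Bool :=
  let d1 := t.takeWhile PySem.Chars.isdigit
  let r1 := t.dropWhile PySem.Chars.isdigit
  match r1 with
  | '.' :: r =>
      pvATail (!d1.isEmpty || !(r.takeWhile PySem.Chars.isdigit).isEmpty)
              (r.dropWhile PySem.Chars.isdigit)
  | _ => pvATail (!d1.isEmpty) r1
def is_float_string_py (s : String) : Bool :=
  match s.toList with
  | [] => false                                     -- "if not s: return False"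
  | c :: r => if c = '+' || c = '-' then pvACore r else pvACore (c :: r)

-- ===== PORT B =====
-- B: split at the first 'e'/'E' into mantissa/exponent, the mantissa at the first '.',
-- then check each piece (optional sign, all digits, at least one digit).
def pvSplitE : List Char → List Char × Option (List Char)
  | [] => ([], none)
  | c :: r =>
    if c = 'e' || c = 'E' then ([], some r)
    else
      let p := pvSplitE r
      (c :: p.1, p.2)
def pvSplitDot : List Char → List Char × Option (List Char)
  | [] => ([], none)
  | c :: r =>
    if c = '.' then ([], some r)
    else
      let p := pvSplitDot r
      (c :: p.1, p.2)
def pvDropSign : List Char → List Char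
  | [] => []
  | c :: r => if c = '+' || c = '-' then r else c :: r
def pvValidMant (m : List Char) : Bool :=
  let p := pvSplitDot (pvDropSign m)
  let digits := p.1 ++ p.2.getD []
  !digits.isEmpty && digits.all PySem.Chars.isdigit

def pvValidExp (e : List Char) : Bool :=
  let e' := pvDropSign e
  !e'.isEmpty && e'.all PySem.Chars.isdigit
def is_float_string_py_alt (s : String) : Bool :=
  let p := pvSplitE s.toList
  pvValidMant p.1 &&
    (match p.2 with
     | none => true
     | some e => pvValidExp e)

-- ===== PRECONDITION & SPEC =====
def Spec_is_float_string_py (s : String) (out : Bool) : Prop := out = is_float_string_py_alt s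
instance (s : String) (out : Bool) : Decidable (Spec_is_float_string_py s out) := by unfold Spec_is_float_string_py; infer_instance

-- ===== CLAIM (what is proved, stated in full; the proofs are below) =====
def Claim_equal_is_float_string_py : Prop := ∀ (s : String), Dom_is_float_string_py s → Spec_is_float_string_py s (is_float_string_py s)

-- ===== LEMMAS AND PROOFS =====
-- B's mantissa check after the sign case split (no sign stripping), and B's body as a
-- function of the post-sign character list.
def pvMantND (m : List Char) : Bool :=
  let p := pvSplitDot m
  let digits := p.1 ++ p.2.getD []
  !digits.isEmpty && digits.all PySem.Chars.isdigit
def pvBCore (t : List Char) : Bool :=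
  pvMantND (pvSplitE t).1 &&
    (match (pvSplitE t).2 with
     | none => true
     | some e => pvValidExp e)

theorem pv_isdigit_ne (c : Char) (h : PySem.Chars.isdigit c = true) :
    c ≠ 'e' ∧ c ≠ 'E' ∧ c ≠ '.' ∧ c ≠ '+' ∧ c ≠ '-' := by
  simp [PySem.Chars.isdigit] at h
  refine ⟨?_, ?_, ?_, ?_, ?_⟩ <;> rintro rfl <;> simp at h

theorem pvSplitE_append (xs r : List Char)
    (h : ∀ c ∈ xs, c ≠ 'e' ∧ c ≠ 'E') :
    pvSplitE (xs ++ r) = ((xs ++ (pvSplitE r).1, (pvSplitE r).2)) := by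
  induction xs with
  | nil => simp
  | cons c xs ih =>
    have hc := h c (by simp)
    simp only [List.cons_append, pvSplitE]
    rw [if_neg (by simp [hc.1, hc.2]), ih (fun c hc => h c (by simp [hc]))]

theorem pvSplitDot_append (xs r : List Char)
    (h : ∀ c ∈ xs, c ≠ '.') :
    pvSplitDot (xs ++ r) = ((xs ++ (pvSplitDot r).1, (pvSplitDot r).2)) := by
  induction xs with
  | nil => simp
  | cons c xs ih =>
    have hc := h c (by simp)
    simp only [List.cons_append, pvSplitDot]
    rw [if_neg (by simp [hc]), ih (fun c hc => h c (by simp [hc]))]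

theorem pv_dropWhile_nil_iff (l : List Char) :
    (l.dropWhile PySem.Chars.isdigit).isEmpty = l.all PySem.Chars.isdigit := by
  induction l with
  | nil => simp
  | cons c l ih =>
    by_cases h : PySem.Chars.isdigit c = true
    · simp [List.dropWhile, h, ih]
    · simp [List.dropWhile, h, Bool.eq_false_iff.mpr h]

theorem pv_tw_dw (p : Char → Bool) (d r : List Char)
    (hall : ∀ c ∈ d, p c = true)
    (hhd : ∀ c w, r = c :: w → p c = false) :
    (d ++ r).takeWhile p = d ∧ (d ++ r).dropWhile p = r := by
  induction d with
  | nil =>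
    cases r with
    | nil => simp
    | cons c w => simp [List.takeWhile_cons, List.dropWhile_cons, hhd c w rfl]
  | cons c d ih =>
    have hc := hall c (by simp)
    have := ih (fun c hc => hall c (by simp [hc]))
    simp [List.takeWhile_cons, List.dropWhile_cons, hc, this.1, this.2]

theorem pv_decomp (l : List Char) :
    ∃ d r, l = d ++ r ∧ (∀ c ∈ d, PySem.Chars.isdigit c = true) ∧
      (∀ c w, r = c :: w → PySem.Chars.isdigit c = false) := by
  refine ⟨l.takeWhile PySem.Chars.isdigit, l.dropWhile PySem.Chars.isdigit,
    (List.takeWhile_append_dropWhile).symm, fun c hc => List.mem_takeWhile_imp hc, ?_⟩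
  intro c w hw
  have := List.head?_dropWhile_not (p := PySem.Chars.isdigit) (l := l)
  rw [hw] at this; simpa using this

theorem pvAExp_eq (r : List Char) : pvAExp r = pvValidExp r := by
  unfold pvAExp pvValidExp pvDropSign
  cases r with
  | nil => simp
  | cons c w =>
    by_cases hs : (c = '+' || c = '-') = true
    · simp only [hs, if_pos]
      cases w with
      | nil => simp
      | cons c' w' =>
        by_cases hd : PySem.Chars.isdigit c' = true
        · simp [hd, List.dropWhile, pv_dropWhile_nil_iff]
        · simp [List.isEmpty_cons, hd, Bool.eq_false_iff.mpr hd]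
    · simp only [Bool.not_eq_true] at hs
      simp only [hs, Bool.false_eq_true, if_false]
      by_cases hd : PySem.Chars.isdigit c = true
      · simp [hd, List.dropWhile, pv_dropWhile_nil_iff]
      · simp [List.isEmpty_cons, hd, Bool.eq_false_iff.mpr hd]

theorem pv_mantND_nodot (d : List Char) (hnd : ∀ c ∈ d, c ≠ '.') :
    pvMantND d = (!d.isEmpty && d.all PySem.Chars.isdigit) := by
  have := pvSplitDot_append d [] hnd
  simp only [List.append_nil] at this
  simp [pvMantND, this, pvSplitDot]

theorem pv_core (t : List Char) : pvACore t = pvBCore t := by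
  obtain ⟨d1, r1, rfl, hd1all, hr1head⟩ := pv_decomp t
  have hd1ne : ∀ c ∈ d1, c ≠ 'e' ∧ c ≠ 'E' := fun c hc =>
    ⟨(pv_isdigit_ne c (hd1all c hc)).1, (pv_isdigit_ne c (hd1all c hc)).2.1⟩
  have hd1nd : ∀ c ∈ d1, c ≠ '.' := fun c hc => (pv_isdigit_ne c (hd1all c hc)).2.2.1
  have hd1dig : d1.all PySem.Chars.isdigit = true := List.all_eq_true.mpr hd1all
  have htw := pv_tw_dw PySem.Chars.isdigit d1 r1 hd1all hr1head
  have hBsplit : pvSplitE (d1 ++ r1) = (d1 ++ (pvSplitE r1).1, (pvSplitE r1).2) :=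
    pvSplitE_append d1 r1 hd1ne
  rw [pvBCore, hBsplit]
  rw [pvACore]
  simp only [htw.1, htw.2]
  cases hr : r1 with
  | nil =>
    simp only [pvSplitE, List.append_nil, pvATail]
    rw [pv_mantND_nodot d1 hd1nd]
    simp [hd1dig]
    cases d1 <;> simp
  | cons c w =>
    have hcnd : PySem.Chars.isdigit c = false := hr1head c w hr
    by_cases hdot : c = '.'
    · subst hdot
      obtain ⟨d2, r3, rfl, hd2all, hr3head⟩ := pv_decomp w
      have hd2ne : ∀ c ∈ d2, c ≠ 'e' ∧ c ≠ 'E' := fun c hc =>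
        ⟨(pv_isdigit_ne c (hd2all c hc)).1, (pv_isdigit_ne c (hd2all c hc)).2.1⟩
      have hd2dig : d2.all PySem.Chars.isdigit = true := List.all_eq_true.mpr hd2all
      have htw2 := pv_tw_dw PySem.Chars.isdigit d2 r3 hd2all hr3head
      simp only [htw2.1, htw2.2]
      have hsp2 : pvSplitE ('.' :: (d2 ++ r3)) =
          ('.' :: d2 ++ (pvSplitE r3).1, (pvSplitE r3).2) := by
        have : ('.' :: (d2 ++ r3)) = ('.' :: d2) ++ r3 := by simp
        rw [this, pvSplitE_append ('.' :: d2) r3 (by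
          intro x hx
          rcases List.mem_cons.mp hx with rfl | hx
          · exact ⟨by decide, by decide⟩
          · exact hd2ne x hx)]
      rw [hsp2]
      have hmant : pvMantND (d1 ++ ('.' :: d2 ++ (pvSplitE r3).1)) =
          (!(d1 ++ (d2 ++ (pvSplitE r3).1)).isEmpty &&
            (d1 ++ (d2 ++ (pvSplitE r3).1)).all PySem.Chars.isdigit) := by
      -- splitDot lands right after d1
        rw [pvMantND, show d1 ++ ('.' :: d2 ++ (pvSplitE r3).1)
              = d1 ++ ('.' :: (d2 ++ (pvSplitE r3).1)) by simp,
          pvSplitDot_append d1 _ hd1nd]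
        simp [pvSplitDot]
      rw [hmant]
      cases hr3 : r3 with
      | nil =>
        simp only [pvSplitE, List.append_nil, pvATail]
        simp [hd1dig, hd2dig]
        cases d1 <;> cases d2 <;> simp
      | cons c' w' =>
        have hc'nd : PySem.Chars.isdigit c' = false := hr3head c' w' hr3
        by_cases he : (c' = 'e' ∨ c' = 'E')
        · have hsplit : pvSplitE (c' :: w') = ([], some w') := by
            rcases he with rfl | rfl <;> simp [pvSplitE]
          rw [hsplit]
          simp only [List.append_nil, pvATail, pvAExp_eq]
          simp [hd1dig, hd2dig]
          cases d1 <;> cases d2 <;> simp <;> exact fun _ => he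
        · push_neg at he
          have hsplit : pvSplitE (c' :: w') = (c' :: (pvSplitE w').1, (pvSplitE w').2) := by
            rw [pvSplitE, if_neg (by simp [he.1, he.2])]
          rw [hsplit]
          have hAside : pvATail (!d1.isEmpty || !d2.isEmpty) (c' :: w') = false := by
            simp [pvATail, he.1, he.2]
          rw [hAside]
          have hall : (d1 ++ (d2 ++ (c' :: (pvSplitE w').1))).all PySem.Chars.isdigit = false :=
            List.all_eq_false.mpr ⟨c', by simp, by simp [hc'nd]⟩
          simp [hall]
    · by_cases he : (c = 'e' ∨ c = 'E')
      · have hsplit : pvSplitE (c :: w) = ([], some w) := by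
          rcases he with rfl | rfl <;> simp [pvSplitE]
        rw [hsplit]
        have hmatch : (match c :: w with
            | '.' :: r => pvATail (!d1.isEmpty || !(r.takeWhile PySem.Chars.isdigit).isEmpty)
                (r.dropWhile PySem.Chars.isdigit)
            | _ => pvATail (!d1.isEmpty) (c :: w)) = pvATail (!d1.isEmpty) (c :: w) := by
          rcases he with rfl | rfl <;> rfl
        rw [hmatch]
        simp only [List.append_nil]
        rw [pv_mantND_nodot d1 hd1nd]
        simp only [pvATail, pvAExp_eq]
        simp [hd1dig]
        cases d1 <;> simp <;> exact fun _ => he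
      · push_neg at he
        have hsplit : pvSplitE (c :: w) = (c :: (pvSplitE w).1, (pvSplitE w).2) := by
          rw [pvSplitE, if_neg (by simp [he.1, he.2])]
        rw [hsplit]
        have hmatch : (match c :: w with
            | '.' :: r => pvATail (!d1.isEmpty || !(r.takeWhile PySem.Chars.isdigit).isEmpty)
                (r.dropWhile PySem.Chars.isdigit)
            | _ => pvATail (!d1.isEmpty) (c :: w)) = pvATail (!d1.isEmpty) (c :: w) := by
          split
          · next r h => injection h with h1 _; exact absurd h1 hdot
          · rfl
        rw [hmatch]
        have hAside : pvATail (!d1.isEmpty) (c :: w) = false := by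
          simp [pvATail, he.1, he.2]
        rw [hAside]
        have hmant : pvMantND (d1 ++ (c :: (pvSplitE w).1)) = false := by
          rw [pvMantND, pvSplitDot_append d1 _ hd1nd]
          rcases hdm : pvSplitDot (c :: (pvSplitE w).1) with ⟨ip, fp⟩
          have hip : ip = c :: (pvSplitDot (pvSplitE w).1).1 := by
            rw [pvSplitDot, if_neg hdot] at hdm
            exact (congrArg Prod.fst hdm).symm
          simp
          intro _ _ hip2
          exact absurd (hip2 c (by simp [hip])) (by simp [hcnd])
        simp [hmant]

theorem pv_validMant_eq (m : List Char)
    (h : ∀ c w, m = c :: w → (c = '+' || c = '-') = false) :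
    pvValidMant m = pvMantND m := by
  cases m with
  | nil => rfl
  | cons c w => simp [pvValidMant, pvMantND, pvDropSign, h c w rfl]

theorem pv_alt_eq (s : String) : is_float_string_py s = is_float_string_py_alt s := by
  rw [is_float_string_py, is_float_string_py_alt]
  cases hc : s.toList with
  | nil => rfl
  | cons c r =>
    simp only []
    by_cases hs : (c = '+' || c = '-') = true
    · rw [if_pos hs]
      have hne : c ≠ 'e' ∧ c ≠ 'E' := by
        rcases Bool.or_eq_true_iff.mp hs with h | h <;> simp_all
      have hsp : pvSplitE (c :: r) = (c :: (pvSplitE r).1, (pvSplitE r).2) := by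
        rw [pvSplitE, if_neg (by simp [hne.1, hne.2])]
      rw [hsp]
      have hv : pvValidMant (c :: (pvSplitE r).1) = pvMantND (pvSplitE r).1 := by
        simp [pvValidMant, pvMantND, pvDropSign, hs]
      rw [hv]
      exact pv_core r
    · rw [if_neg hs]
      have hv : pvValidMant (pvSplitE (c :: r)).1 = pvMantND (pvSplitE (c :: r)).1 := by
        have hs' : (c = '+' || c = '-') = false := Bool.eq_false_iff.mpr hs
        by_cases he : (c = 'e' || c = 'E') = true
        · rw [pvSplitE, if_pos he]; rfl
        · rw [pvSplitE, if_neg (by simp_all)]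
          exact pv_validMant_eq _ (by
            intro c' w hw
            injection hw with h1 _
            rw [← h1]; exact hs')
      rw [hv]
      exact pv_core (c :: r)

-- ===== VERDICT (by name: the statement is the Claim_ definition above) =====
theorem is_float_string_py_spec : Claim_equal_is_float_string_py := by
  intro s _
  unfold Spec_is_float_string_py
  exact pv_alt_eq s
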